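-- pv_equiv track=rewrite | github.com/verixiaapps/verixiaapps.github.io | scripts/expand_token_keywords.py | has_excessive_repeated_terms
-- ===== SOURCE A (Python) =====
-- from collections import Counter
--
-- STOPWORDS = {
--     "is",
--     "this",
--     "a",
--     "an",
--     "the",
--     "to",
--     "for",
--     "of",
--     "and",
--     "or",
--     "with",
--     "on",
--     "in",
--     "can",
--     "should",
--     "what",
--     "why",
--     "when",
--     "where",
--     "how",
--     "i",
--     "now",
-- }
--
-- def has_excessive_repeated_terms(text: str) -> bool:
--     words = text.split()
--     meaningful = [w for w in words if w not in STOPWORDS]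
--     if not meaningful:
--         return True
--     counts = Counter(meaningful)
--     max_count = max(counts.values())
--     if max_count >= 3:
--         return True
--     repeated_unique = sum(1 for count in counts.values() if count > 1)
--     if repeated_unique >= 2:
--         return True
--     return False
-- ===== SOURCE B (Python) =====
-- STOPWORDS = {
--     "is", "this", "a", "an", "the", "to", "for", "of", "and", "or",
--     "with", "on", "in", "can", "should", "what", "why", "when", "where",
--     "how", "i", "now",
-- }
--
-- def has_excessive_repeated_terms(text: str) -> bool:
--     meaningful = [w for w in text.split() if w not in STOPWORDS]
--     # total number of repetitions beyond first occurrences; >= 2 covers both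
--     # "one word three times" and "two words twice" in a single arithmetic test
--     return len(meaningful) - len(set(meaningful)) >= 2 or not meaningful
-- ===== Notes on version B (the rewrite author's own statement) =====
-- stated objective: simpler
-- what changed: Replaces the Counter build plus the separate max-count scan and repeated-unique scan by a single arithmetic test: len(meaningful) - len(set(meaningful)) >= 2 (total repetitions beyond first occurrences), which is provably equivalent to A's disjunction.
import Mathlib
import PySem

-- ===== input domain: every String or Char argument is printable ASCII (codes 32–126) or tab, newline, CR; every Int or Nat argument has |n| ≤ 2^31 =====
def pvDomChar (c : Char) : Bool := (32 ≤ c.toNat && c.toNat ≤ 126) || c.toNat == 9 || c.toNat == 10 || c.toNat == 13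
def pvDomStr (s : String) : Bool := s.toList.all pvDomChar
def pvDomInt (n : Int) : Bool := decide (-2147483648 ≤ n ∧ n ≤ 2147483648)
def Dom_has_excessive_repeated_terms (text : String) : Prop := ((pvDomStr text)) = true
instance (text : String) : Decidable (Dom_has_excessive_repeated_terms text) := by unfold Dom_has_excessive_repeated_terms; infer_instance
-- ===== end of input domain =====

-- B replaces A's Counter + max-scan + repeated-unique scan by the single arithmetic
-- test len(meaningful) - len(set(meaningful)) >= 2 (total repetitions beyond first
-- occurrences); objective: simpler.

-- module-level constant shared by both Pythons
def STOPWORDS : PySem.Set String := PySem.Set.ofList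
  ["is", "this", "a", "an", "the", "to", "for", "of", "and", "or",
   "with", "on", "in", "can", "should", "what", "why", "when", "where",
   "how", "i", "now"]

-- ===== PORT A =====
def has_excessive_repeated_terms (text : String) : Bool :=
  let words := PySem.Str.split₀ text
  let meaningful := words.filter (fun w => !(PySem.Set.contains STOPWORDS w))
  if meaningful.isEmpty then true
  else
    let counts := PySem.Dict.counter meaningful
    match PySem.List.max? counts.values (fun x => x) with
    | none => true  -- unreachable: counts is nonempty here (Python's max would raise on empty)
    | some maxCount =>
      if 3 ≤ maxCount then true
      else
        if 2 ≤ (((counts.values.filter (fun c => decide (1 < c))).length : Int)) then true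
        else false

-- ===== PORT B =====
def has_excessive_repeated_terms_alt (text : String) : Bool :=
  let meaningful := (PySem.Str.split₀ text).filter (fun w => !(PySem.Set.contains STOPWORDS w))
  decide (2 ≤ (meaningful.length : Int) - ((PySem.Set.ofList meaningful).length : Int))
    || meaningful.isEmpty

-- ===== PRECONDITION & SPEC =====
def Spec_has_excessive_repeated_terms (text : String) (out : Bool) : Prop := out = has_excessive_repeated_terms_alt text
instance (text : String) (out : Bool) : Decidable (Spec_has_excessive_repeated_terms text out) := by unfold Spec_has_excessive_repeated_terms; infer_instance

-- ===== CLAIM (what is proved, stated in full; the proofs are below) =====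
def Claim_equal_has_excessive_repeated_terms : Prop := ∀ (text : String), Dom_has_excessive_repeated_terms text → Spec_has_excessive_repeated_terms text (has_excessive_repeated_terms text)

-- ===== LEMMAS AND PROOFS =====

-- sum of a list of integers each ≥ 1 is at least its length
lemma pv_sum_ge_len (t : List Int) (h : ∀ x ∈ t, 1 ≤ x) : (t.length : Int) ≤ t.sum := by
  induction t with
  | nil => simp
  | cons a t ih =>
    have ha := h a (by simp)
    have := ih (fun x hx => h x (by simp [hx]))
    simp only [List.sum_cons, List.length_cons]
    push_cast
    omega

-- any member bounds the excess from below
lemma pv_mem_le_excess (t : List Int) (v : Int) (hv : v ∈ t) (h : ∀ x ∈ t, 1 ≤ x) :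
    v - 1 ≤ t.sum - t.length := by
  induction t with
  | nil => simp at hv
  | cons a t ih =>
    have ht : ∀ x ∈ t, 1 ≤ x := fun x hx => h x (by simp [hx])
    have hs := pv_sum_ge_len t ht
    rcases List.mem_cons.mp hv with rfl | hvt
    · simp only [List.sum_cons, List.length_cons]; push_cast; omega
    · have := ih hvt ht
      have ha := h a (by simp)
      simp only [List.sum_cons, List.length_cons]
      push_cast
      
      omega

-- when every element is ≤ 2, the excess equals the number of elements > 1
lemma pv_filter_eq_excess (t : List Int) (h1 : ∀ x ∈ t, 1 ≤ x) (h2 : ∀ x ∈ t, x ≤ 2) :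
    ((t.filter (fun v => decide (1 < v))).length : Int) = t.sum - t.length := by
  induction t with
  | nil => simp
  | cons a t ih =>
    have ha1 := h1 a (by simp)
    have ha2 := h2 a (by simp)
    have := ih (fun x hx => h1 x (by simp [hx])) (fun x hx => h2 x (by simp [hx]))
    by_cases hb : 1 < a <;>
      simp only [List.filter_cons, hb, decide_true, decide_false, List.sum_cons,
        List.length_cons, if_true, if_false] <;> push_cast <;> omega

-- the core characterization: A's disjunction ⟺ B's arithmetic test
lemma pv_core (vals : List Int) (h : ∀ x ∈ vals, 1 ≤ x) :
    ((∃ v ∈ vals, 3 ≤ v) ∨ 2 ≤ ((vals.filter (fun v => decide (1 < v))).length : Int)) ↔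
      2 ≤ vals.sum - vals.length := by
  by_cases hex : ∃ v ∈ vals, 3 ≤ v
  · obtain ⟨v, hv, h3⟩ := hex
    have := pv_mem_le_excess vals v hv h
    constructor
    · intro _; omega
    · intro _; exact Or.inl ⟨v, hv, h3⟩
  · push_neg at hex
    have h2 : ∀ x ∈ vals, x ≤ 2 := fun x hx => by have := hex x hx; omega
    rw [pv_filter_eq_excess vals h h2]
    simp [hex]
    intro x hx
    have := hex x hx; omega

-- casting a summed count-map to Int
lemma pv_sum_cast (l : List String) (d : List String) :
    (d.map (fun k => (l.count k : Int))).sum = ((d.map (fun k => l.count k)).sum : Nat) := by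
  induction d with
  | nil => simp
  | cons a d ih => simp [ih]

-- the counts over the deduplicated list sum to the length
lemma pv_sum_counts (l : List String) :
    ((PySem.Set.ofList l).map (fun k => (l.count k : Int))).sum = (l.length : Int) := by
  rw [pv_sum_cast]
  congr 1
  have hnd : (PySem.Set.ofList l).Nodup := PySem.Set.nodup_ofList l
  have hfs : (PySem.Set.ofList l).toFinset = l.toFinset := by
    ext x; simp [List.mem_toFinset, PySem.Set.mem_ofList]
  calc ((PySem.Set.ofList l).map (fun k => l.count k)).sum
      = ∑ x ∈ (PySem.Set.ofList l).toFinset, l.count x := (List.sum_toFinset _ hnd).symm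
    _ = ∑ x ∈ l.toFinset, l.count x := by rw [hfs]
    _ = l.length := by
        have := Multiset.toFinset_sum_count_eq (l : Multiset String)
        simpa using this

-- A and B agree on any word list (stated over the shared 'meaningful' list)
lemma pv_main (l : List String) :
    (if l.isEmpty then true
     else
       match PySem.List.max? (PySem.Dict.counter l).values (fun x => x) with
       | none => true
       | some maxCount =>
         if 3 ≤ maxCount then true
         else
           if 2 ≤ ((((PySem.Dict.counter l).values.filter (fun c => decide (1 < c))).length : Int)) then true
           else false) =
    (decide (2 ≤ (l.length : Int) - ((PySem.Set.ofList l).length : Int)) || l.isEmpty) := by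
  cases l with
  | nil => simp
  | cons a t =>
    set l := a :: t with hl
    have hvals : (PySem.Dict.counter l).values = (PySem.Set.ofList l).map (fun k => (l.count k : Int)) := by
      show (PySem.Dict.counter l).items.map Prod.snd = _
      rw [PySem.Dict.items_counter]
      simp [Function.comp]
    have hne : (PySem.Dict.counter l).values ≠ [] := by
      rw [hvals]
      simp only [ne_eq, List.map_eq_nil_iff]
      intro h
      have hmem := (PySem.Set.mem_ofList l a).mpr (by simp [hl])
      rw [h] at hmem
      simp at hmem
    have hpos : ∀ x ∈ (PySem.Dict.counter l).values, 1 ≤ x := by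
      rw [hvals]
      intro x hx
      obtain ⟨k, hk, rfl⟩ := List.mem_map.mp hx
      have : k ∈ l := (PySem.Set.mem_ofList l k).mp hk
      have := List.count_pos_iff.mpr this
      omega
    have hsum : (PySem.Dict.counter l).values.sum = (l.length : Int) := by
      rw [hvals]; exact pv_sum_counts l
    have hlen : ((PySem.Dict.counter l).values.length : Int) = ((PySem.Set.ofList l).length : Int) := by
      rw [hvals]; simp
    cases hmx : PySem.List.max? (PySem.Dict.counter l).values (fun x => x) with
    | none => exact absurd ((PySem.List.max?_eq_none_iff _ _).mp hmx) hne
    | some m =>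
      have hmem := PySem.List.max?_mem hmx
      have hmax := PySem.List.max?_isMax hmx
      have hiff : (3 ≤ m) ↔ ∃ v ∈ (PySem.Dict.counter l).values, 3 ≤ v := by
        constructor
        · intro h3; exact ⟨m, hmem, h3⟩
        · rintro ⟨v, hv, h3⟩; exact le_trans h3 (hmax v hv)
      have hchar := pv_core (PySem.Dict.counter l).values hpos
      rw [hsum, hlen] at hchar
      have hemp : l.isEmpty = false := by rw [hl]; rfl
      rw [hemp]
      simp only [if_false, Bool.or_false]
      by_cases hA : (3 ≤ m) ∨ 2 ≤ ((((PySem.Dict.counter l).values.filter (fun c => decide (1 < c))).length : Int))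
      · have hB : 2 ≤ (l.length : Int) - ((PySem.Set.ofList l).length : Int) := by
          apply hchar.mp
          rcases hA with h | h
          · exact Or.inl (hiff.mp h)
          · exact Or.inr h
        rcases hA with h | h
        · simp [h, hB]
        · by_cases h3 : 3 ≤ m <;> simp [h3, h, hB]
      · push_neg at hA
        have hB : ¬ (2 ≤ (l.length : Int) - ((PySem.Set.ofList l).length : Int)) := by
          intro hb
          rcases hchar.mpr hb with h | h
          · exact absurd (hiff.mpr h) (by omega)
          · exact absurd h (by omega)
        simp [hA.1, hA.2, hB]
        omega

-- ===== VERDICT (by name: the statement is the Claim_ definition above) =====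
theorem has_excessive_repeated_terms_spec : Claim_equal_has_excessive_repeated_terms := by
  intro text _
  unfold Spec_has_excessive_repeated_terms has_excessive_repeated_terms has_excessive_repeated_terms_alt
  exact pv_main _
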